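-- pv_equiv track=rewrite | github.com/Pbabu-Github/Gene_finder | tp1_genes.py | orf_sequence
-- ===== SOURCE A (Python) =====
-- def is_stop(segment):
--     l=["TAG","TAA","TGA"]
--     if segment.upper()in l:
--         return True
--     else:
--         return False
--
-- def orf_sequence(dna):
--     orf=""
--     for i in range (0,len(dna),3):
--         dna_seg=dna[i:(i+3)]
--         if(is_stop(dna_seg)!=True):
--                 orf+=dna_seg
--         elif(is_stop(dna_seg)!=False):
--             break
--     return orf
-- ===== SOURCE B (Python) =====
-- def is_stop(segment):
--     return segment.upper() in ("TAG", "TAA", "TGA")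
--
-- def orf_sequence(dna):
--     for i in range(0, len(dna), 3):
--         if is_stop(dna[i:i + 3]):
--             return dna[:i]
--     return dna
-- ===== Notes on version B (the rewrite author's own statement) =====
-- stated objective: simpler
-- what changed: B no longer builds the ORF by repeated string concatenation: it only searches for the index of the first stop codon and returns a single slice dna[:i] (or dna when no stop occurs).
import Mathlib
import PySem

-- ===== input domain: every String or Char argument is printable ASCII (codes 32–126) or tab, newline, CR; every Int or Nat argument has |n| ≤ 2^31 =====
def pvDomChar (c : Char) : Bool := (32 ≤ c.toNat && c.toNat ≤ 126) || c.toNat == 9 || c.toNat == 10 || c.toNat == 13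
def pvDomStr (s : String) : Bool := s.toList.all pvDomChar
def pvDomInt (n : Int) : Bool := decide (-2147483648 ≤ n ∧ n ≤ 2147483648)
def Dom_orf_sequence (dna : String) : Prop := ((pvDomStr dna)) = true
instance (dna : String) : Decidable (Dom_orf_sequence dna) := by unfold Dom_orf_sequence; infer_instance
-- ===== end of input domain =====

-- B replaces A's codon-by-codon string accumulation by finding the first stop-codon index and
-- returning one slice dna[:i] (objective: simpler).

-- ===== PORT A =====
-- is_stop: segment.upper() in ["TAG","TAA","TGA"]
def isStopA (seg : List Char) : Bool :=
  if (PySem.Chars.upper seg = "TAG".toList ∨ PySem.Chars.upper seg = "TAA".toList ∨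
      PySem.Chars.upper seg = "TGA".toList) then true else false

-- the for-loop of A: accumulate non-stop codons, break at the first stop
def orfLoopA (dna : List Char) : List Int → List Char → List Char
  | [], orf => orf
  | i :: rest, orf =>
    let seg := PySem.Chars.slice dna (some i) (some (i + 3))
    if isStopA seg ≠ true then orfLoopA dna rest (orf ++ seg)
    else if isStopA seg ≠ false then orf
    else orfLoopA dna rest orf

def orf_sequence (dna : String) : String :=
  String.ofList (orfLoopA dna.toList (PySem.List.pyRange 0 (PySem.Str.len dna) 3) [])

-- ===== PORT B =====
def isStopB (seg : List Char) : Bool :=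
  PySem.Chars.upper seg = "TAG".toList ∨ PySem.Chars.upper seg = "TAA".toList ∨
    PySem.Chars.upper seg = "TGA".toList

-- the for-loop of B: return the index of the first stop codon, if any
def firstStopB (dna : List Char) : List Int → Option Int
  | [] => none
  | i :: rest =>
    if isStopB (PySem.Chars.slice dna (some i) (some (i + 3))) then some i
    else firstStopB dna rest

def orf_sequence_alt (dna : String) : String :=
  match firstStopB dna.toList (PySem.List.pyRange 0 (PySem.Str.len dna) 3) with
  | some i => String.ofList (PySem.Chars.slice dna.toList none (some i))
  | none => dna

-- ===== PRECONDITION & SPEC =====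
def Spec_orf_sequence (dna : String) (out : String) : Prop := out = orf_sequence_alt dna
instance (dna : String) (out : String) : Decidable (Spec_orf_sequence dna out) := by unfold Spec_orf_sequence; infer_instance

-- ===== CLAIM (what is proved, stated in full; the proofs are below) =====
def Claim_equal_orf_sequence : Prop := ∀ (dna : String), Dom_orf_sequence dna → Spec_orf_sequence dna (orf_sequence dna)

-- ===== LEMMAS AND PROOFS =====

theorem isStop_eq (seg : List Char) : isStopA seg = isStopB seg := by
  simp [isStopA, isStopB]

theorem pyRange3_cons (a b : Int) (h : a < b) :
    PySem.List.pyRange a b 3 = a :: PySem.List.pyRange (a + 3) b 3 := by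
  rw [PySem.List.pyRange_of_pos a b (by norm_num),
      PySem.List.pyRange_of_pos (a + 3) b (by norm_num)]
  have hcount : (if a < b then ((b - a + 3 - 1) / 3).toNat else 0)
      = (if a + 3 < b then ((b - (a + 3) + 3 - 1) / 3).toNat else 0) + 1 := by
    split_ifs <;> omega
  rw [hcount, List.range_succ_eq_map, List.map_cons, List.map_map]
  refine List.cons_eq_cons.mpr ⟨by simp, ?_⟩
  apply List.map_congr_left
  intro k _
  simp only [Function.comp]
  push_cast
  ring

theorem loop_eq (cs : List Char) (j : Nat) :
    orfLoopA cs (PySem.List.pyRange (j : Int) (cs.length : Int) 3) (cs.take j)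
      = (match firstStopB cs (PySem.List.pyRange (j : Int) (cs.length : Int) 3) with
         | some i => PySem.Chars.slice cs none (some i)
         | none => cs) := by
  by_cases hlt : (j : Int) < (cs.length : Int)
  · rw [pyRange3_cons _ _ hlt]
    have hseg : PySem.Chars.slice cs (some (j : Int)) (some ((j : Int) + 3))
        = List.take 3 (List.drop j cs) := by
      have ht : ((j : Int) + 3).toNat = j + 3 := by omega
      have := PySem.List.slice_toNat cs (a := (j : Int)) (b := (j : Int) + 3)
        (by positivity) (by positivity)
      simpa [PySem.Chars.slice, ht] using this
    by_cases hstop : isStopB (PySem.Chars.slice cs (some (j : Int)) (some ((j : Int) + 3)))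
    · -- first codon is a stop codon: A breaks with the accumulator, B slices up to j
      simp only [orfLoopA, firstStopB, isStop_eq, hstop, if_pos, ne_eq,
        Bool.true_eq_false, not_true_eq_false, if_false, not_false_eq_true]
      rw [PySem.Chars.slice]
      rw [PySem.List.slice_to cs (by positivity)]
      simp
    · -- not a stop codon: A appends the codon, B keeps scanning
      simp only [orfLoopA, firstStopB, isStop_eq, hstop, ne_eq, Bool.false_eq_true,
        not_false_eq_true, if_true, if_false]
      have hacc : cs.take j ++ PySem.Chars.slice cs (some (j : Int)) (some ((j : Int) + 3))
          = cs.take (j + 3) := by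
        rw [hseg, ← List.take_add]
      have hcast : (j : Int) + 3 = ((j + 3 : Nat) : Int) := by push_cast; ring
      rw [hacc, hcast]
      by_cases hle : ((j + 3 : Nat) : Int) ≤ (cs.length : Int)
      · exact loop_eq cs (j + 3)
      · -- j+3 past the end: the remaining range is empty and take (j+3) is all of cs
        have hnil : PySem.List.pyRange ((j + 3 : Nat) : Int) (cs.length : Int) 3 = [] := by
          rw [PySem.List.pyRange_of_pos _ _ (by norm_num),
            if_neg (by omega : ¬ (((j + 3 : Nat) : Int) < (cs.length : Int)))]
          simp
        rw [hnil]
        simp only [orfLoopA, firstStopB]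
        exact List.take_of_length_le (by omega)
  · have hnil : PySem.List.pyRange (j : Int) (cs.length : Int) 3 = [] := by
      rw [PySem.List.pyRange_of_pos _ _ (by norm_num), if_neg hlt]
      simp
    rw [hnil]
    simp only [orfLoopA, firstStopB]
    have : cs.length ≤ j := by exact_mod_cast not_lt.mp hlt
    exact List.take_of_length_le this
termination_by cs.length - j

-- ===== VERDICT (by name: the statement is the Claim_ definition above) =====
theorem orf_sequence_spec : Claim_equal_orf_sequence := by
  intro dna _
  unfold Spec_orf_sequence orf_sequence orf_sequence_alt
  have h0 : (dna.toList.take 0) = ([] : List Char) := rfl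
  have hlen : PySem.Str.len dna = (dna.toList.length : Int) := by
    simp [PySem.Str.len_eq]
  rw [hlen]
  have := loop_eq dna.toList 0
  rw [h0] at this
  push_cast at this ⊢
  rw [this]
  cases hfs : firstStopB dna.toList (PySem.List.pyRange 0 (dna.toList.length : Int) 3) with
  | none => simp
  | some i => simp
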